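-- pv_equiv track=rewrite | github.com/IsabellKonrad/SongsOfGod | flask/app/input_songs/extractFunctions.py | chords_to_tuples
-- ===== SOURCE A (Python) =====
-- def chords_to_tuples(chord_line):
--     chord_line = chord_line.strip('\n')
--     indices = []
--     isChord = False
--     for i, ltr in enumerate(chord_line):
--         if ltr != " " and isChord == False:
--             isChord = True
--             chord = ltr
--             index = i
--         elif ltr != " " and isChord == True:
--             chord = chord + ltr
--         elif ltr == " " and isChord == True:
--             isChord = False
--             indices.append((chord, index))
--             chord = ''
--     if chord:
--         indices.append((chord, index))
--     return indices
-- ===== SOURCE B (Python) =====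
-- def chords_to_tuples(chord_line):
--     # Split-based tokenizer: split on the literal space character and track
--     # each chunk's start index cumulatively; empty chunks (runs of spaces) are skipped.
--     s = chord_line.strip('\n')
--     out = []
--     i = 0
--     for tok in s.split(' '):
--         if tok:
--             out.append((tok, i))
--         i += len(tok) + 1
--     return out
-- ===== Notes on version B (the rewrite author's own statement) =====
-- stated objective: idiomatic
-- what changed: Replaced the char-by-char isChord state machine (with its post-loop leftover flush) by splitting the stripped line on the literal space character (C-level str.split) and accumulating each chunk's start index.
import Mathlib
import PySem

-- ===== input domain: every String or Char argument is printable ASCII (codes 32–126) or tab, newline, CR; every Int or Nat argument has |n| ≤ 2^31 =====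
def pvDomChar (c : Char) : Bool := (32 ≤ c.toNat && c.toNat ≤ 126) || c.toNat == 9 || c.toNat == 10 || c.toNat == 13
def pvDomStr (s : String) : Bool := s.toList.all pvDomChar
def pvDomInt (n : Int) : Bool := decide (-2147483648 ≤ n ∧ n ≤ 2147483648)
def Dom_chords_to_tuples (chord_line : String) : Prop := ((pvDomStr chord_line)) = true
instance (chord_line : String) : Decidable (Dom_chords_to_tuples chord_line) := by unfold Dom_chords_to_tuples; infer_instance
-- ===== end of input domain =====

-- B replaces A's char-by-char isChord state machine by splitting on the space character
-- while accumulating each chunk's start index (idiomatic; same return value on Pre_).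


-- ===== PORT A =====
-- the for-loop over enumerate(chord_line), state = (acc, isChord, chord, index);
-- Python's undefined 'chord' start is modelled as [] (A raises exactly there, excluded by Pre_)
def chordsLoop : List Char → Int → Bool → List Char → Int → List (String × Int) →
    List (String × Int) × List Char × Int
  | [], _, _, chord, index, acc => (acc, chord, index)
  | c :: cs, i, isChord, chord, index, acc =>
    if c ≠ ' ' ∧ isChord = false then chordsLoop cs (i + 1) true [c] i acc
    else if c ≠ ' ' ∧ isChord = true then chordsLoop cs (i + 1) true (chord ++ [c]) index acc
    else if c = ' ' ∧ isChord = true then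
      chordsLoop cs (i + 1) false [] index (acc ++ [(String.ofList chord, index)])
    else chordsLoop cs (i + 1) isChord chord index acc

def chords_to_tuples (chord_line : String) : List (String × Int) :=
  match chordsLoop (PySem.Chars.stripChars chord_line.toList ['\n']) 0 false [] 0 [] with
  | (acc, chord, index) => if chord ≠ [] then acc ++ [(String.ofList chord, index)] else acc

-- ===== PORT B =====
-- the for-loop of Source B over s.split(' '): emit non-empty chunks with the running start index
def chordsAltLoop : List (List Char) → Int → List (String × Int) → List (String × Int)
  | [], _, out => out
  | t :: ts, i, out =>
    chordsAltLoop ts (i + t.length + 1) (if t ≠ [] then out ++ [(String.ofList t, i)] else out)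

def chords_to_tuples_alt (chord_line : String) : List (String × Int) :=
  chordsAltLoop (PySem.Chars.splitOn (PySem.Chars.stripChars chord_line.toList ['\n']) [' ']) 0 []

-- ===== PRECONDITION & SPEC =====
-- A raises NameError ('chord' never assigned) exactly when the stripped line has no non-space
-- character; Pre_ admits every other input (= every input Python A returns on).
def Pre_chords_to_tuples (chord_line : String) : Prop :=
  (PySem.Chars.stripChars chord_line.toList ['\n']).any (fun c => c ≠ ' ') = true
instance (chord_line : String) : Decidable (Pre_chords_to_tuples chord_line) := by
  unfold Pre_chords_to_tuples; infer_instance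

def pvWitness_chords_to_tuples : String := "C  G7 Am\n"

def Spec_chords_to_tuples (chord_line : String) (out : List (String × Int)) : Prop :=
  out = chords_to_tuples_alt chord_line
instance (chord_line : String) (out : List (String × Int)) : Decidable (Spec_chords_to_tuples chord_line out) := by
  unfold Spec_chords_to_tuples; infer_instance

-- ===== CLAIM (what is proved, stated in full; the proofs are below) =====
def Claim_equal_chords_to_tuples : Prop := ∀ (chord_line : String), Dom_chords_to_tuples chord_line → Pre_chords_to_tuples chord_line → Spec_chords_to_tuples chord_line (chords_to_tuples chord_line)

-- ===== LEMMAS AND PROOFS =====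

-- proof-only model of splitting on a single space character
def consHead (p : List Char) : List (List Char) → List (List Char)
  | [] => [p]
  | t :: ts => (p ++ t) :: ts

def mySplit : List Char → List (List Char)
  | [] => [[]]
  | c :: cs => if c = ' ' then [] :: mySplit cs else consHead [c] (mySplit cs)

lemma consHead_ne_nil (p : List Char) (ts : List (List Char)) : consHead p ts ≠ [] := by
  cases ts <;> simp [consHead]

lemma consHead_nil (ts : List (List Char)) (h : ts ≠ []) : consHead [] ts = ts := by
  cases ts with
  | nil => exact absurd rfl h
  | cons t ts => simp [consHead]

lemma consHead_consHead (p q : List Char) (ts : List (List Char)) :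
    consHead p (consHead q ts) = consHead (p ++ q) ts := by
  cases ts <;> simp [consHead]

lemma mySplit_ne_nil (cs : List Char) : mySplit cs ≠ [] := by
  cases cs with
  | nil => simp [mySplit]
  | cons c cs =>
    by_cases h : c = ' ' <;> simp [mySplit, h, consHead_ne_nil]

lemma splitOn_go_space (fuel : Nat) (l cur : List Char) (acc : List (List Char))
    (hf : l.length < fuel) :
    PySem.Chars.splitOn.go [' '] fuel l cur acc
      = acc.reverse ++ consHead cur.reverse (mySplit l) := by
  induction fuel generalizing l cur acc with
  | zero => omega
  | succ f ih =>
    cases l with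
    | nil =>
      simp [PySem.Chars.splitOn.go, mySplit, consHead]
    | cons c rest =>
      by_cases h : c = ' '
      · subst h
        have : PySem.Chars.splitOn.go [' '] (f + 1) (' ' :: rest) cur acc
            = PySem.Chars.splitOn.go [' '] f rest [] (cur.reverse :: acc) := by
          simp [PySem.Chars.splitOn.go, List.isPrefixOf]
        rw [this, ih rest [] (cur.reverse :: acc) (by simpa using Nat.lt_of_succ_lt_succ hf)]
        simp [mySplit, consHead]
        cases hms : mySplit rest with
        | nil => exact absurd hms (mySplit_ne_nil rest)
        | cons t ts => rfl
      · have : PySem.Chars.splitOn.go [' '] (f + 1) (c :: rest) cur acc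
            = PySem.Chars.splitOn.go [' '] f rest (c :: cur) acc := by
          simp [PySem.Chars.splitOn.go, List.isPrefixOf, Ne.symm h]
        rw [this, ih rest (c :: cur) acc (by simpa using Nat.lt_of_succ_lt_succ hf)]
        simp [mySplit, h, consHead_consHead]

lemma splitOn_eq_mySplit (cs : List Char) :
    PySem.Chars.splitOn cs [' '] = mySplit cs := by
  unfold PySem.Chars.splitOn
  rw [splitOn_go_space cs.length.succ cs [] [] (Nat.lt_succ_self _)]
  simp [consHead_nil _ (mySplit_ne_nil cs)]

-- A's loop followed by the post-loop flush
def AFin (cs : List Char) (i : Int) (b : Bool) (chord : List Char) (index : Int)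
    (acc : List (String × Int)) : List (String × Int) :=
  match chordsLoop cs i b chord index acc with
  | (a, ch, ix) => if ch ≠ [] then a ++ [(String.ofList ch, ix)] else a

-- joint invariant: between words (isChord = false, chord = []) and inside a word
lemma joint (cs : List Char) :
    (∀ i index acc, AFin cs i false [] index acc = chordsAltLoop (mySplit cs) i acc)
    ∧ (∀ chord index acc, chord ≠ [] →
        AFin cs (index + chord.length) true chord index acc
          = chordsAltLoop (consHead chord (mySplit cs)) index acc) := by
  induction cs with
  | nil =>
    constructor
    · intro i index acc
      simp [AFin, chordsLoop, mySplit, chordsAltLoop]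
    · intro chord index acc h
      simp [AFin, chordsLoop, mySplit, consHead, chordsAltLoop, h]
  | cons c cs ih =>
    constructor
    · intro i index acc
      by_cases h : c = ' '
      · subst h
        have hA : AFin (' ' :: cs) i false [] index acc = AFin cs (i + 1) false [] index acc := by
          simp [AFin, chordsLoop]
        rw [hA, ih.1]
        simp [mySplit, chordsAltLoop]
      · have hA : AFin (c :: cs) i false [] index acc
            = AFin cs (i + 1) true [c] i acc := by
          simp [AFin, chordsLoop, h]
        rw [hA]
        have := ih.2 [c] i acc (by simp)
        simp only [List.length_singleton, Int.natCast_one] at this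
        rw [this]
        simp [mySplit, h]
    · intro chord index acc hch
      by_cases h : c = ' '
      · subst h
        have hA : AFin (' ' :: cs) (index + chord.length) true chord index acc
            = AFin cs (index + chord.length + 1) false [] index
                (acc ++ [(String.ofList chord, index)]) := by
          simp [AFin, chordsLoop]
        rw [hA, ih.1]
        simp [mySplit, consHead, chordsAltLoop, hch]
      · have hA : AFin (c :: cs) (index + chord.length) true chord index acc
            = AFin cs (index + chord.length + 1) true (chord ++ [c]) index acc := by
          simp [AFin, chordsLoop, h]
        rw [hA]
        have := ih.2 (chord ++ [c]) index acc (by simp)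
        have hlen : (index : Int) + (chord ++ [c]).length = index + chord.length + 1 := by
          push_cast [List.length_append, List.length_singleton]; ring
        rw [hlen] at this
        rw [this]
        simp [mySplit, h, consHead_consHead]

-- ===== VERDICT (by name: the statement is the Claim_ definition above) =====
theorem chords_to_tuples_spec : Claim_equal_chords_to_tuples := by
  intro chord_line _ _
  unfold Spec_chords_to_tuples chords_to_tuples chords_to_tuples_alt
  rw [splitOn_eq_mySplit]
  have h := (joint (PySem.Chars.stripChars chord_line.toList ['\n'])).1 0 0 []
  unfold AFin at h
  exact h
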